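-- pv_equiv track=rewrite | github.com/BillJr99/Ursinus-Boilerplate-Code | course/ursinus_canvas_update_rubrics.py | getDayNum
-- ===== SOURCE A (Python) =====
-- def getDayNum(dayidx, M, T, W, R, F, S, U):
--     """
--     Map day index within the meeting pattern to an absolute weekday number.
--     Example: if meets on M, W, F and dayidx=1 -> Wednesday -> 2.
--     """
--     day_flags = [M, T, W, R, F, S, U]
--     idx = int(dayidx)
--     for i, flag in enumerate(day_flags):
--         if flag:
--             if idx == 0: return i
--             idx -= 1
--     return 0
-- ===== SOURCE B (Python) =====
-- def getDayNum(dayidx, M, T, W, R, F, S, U):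
--     flags = [M, T, W, R, F, S, U]
--     k = int(dayidx)
--     # weekday i is the answer iff its flag is set and exactly k set flags precede it;
--     # the sum has at most one term, and is 0 when no weekday qualifies.
--     return sum(i for i in range(7)
--                if flags[i] and sum(1 for f in flags[:i] if f) == k)
-- ===== Notes on version B (the rewrite author's own statement) =====
-- stated objective: alternative
-- what changed: A's stateful scan that decrements a counter and early-exits is replaced by a stateless arithmetic characterization: sum over all weekdays i of i where flag i is set and the prefix count of set flags before i equals dayidx (at most one such i; the empty sum gives 0 out of range).
import Mathlib
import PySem

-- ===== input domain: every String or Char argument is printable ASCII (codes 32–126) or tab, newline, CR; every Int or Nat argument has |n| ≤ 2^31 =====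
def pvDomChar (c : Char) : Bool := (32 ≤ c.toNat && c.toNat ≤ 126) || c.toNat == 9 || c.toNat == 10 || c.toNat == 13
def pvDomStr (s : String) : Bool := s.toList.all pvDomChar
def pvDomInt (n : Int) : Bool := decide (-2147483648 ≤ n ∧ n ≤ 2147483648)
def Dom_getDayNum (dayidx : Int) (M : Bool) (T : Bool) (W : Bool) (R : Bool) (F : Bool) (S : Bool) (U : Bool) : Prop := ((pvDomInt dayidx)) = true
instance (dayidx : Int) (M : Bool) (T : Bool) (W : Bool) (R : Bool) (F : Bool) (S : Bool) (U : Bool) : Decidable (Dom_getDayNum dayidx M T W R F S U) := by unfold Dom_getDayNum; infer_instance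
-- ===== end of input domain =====

-- B replaces A's stateful scan-and-decrement with early exit by a stateless
-- arithmetic characterization: sum of all weekdays i whose flag is set and whose
-- prefix count of set flags equals dayidx (alternative decomposition, same cost).

-- ===== PORT A =====
-- the 'for i, flag in enumerate(day_flags)' loop with the mutable 'idx'
def getDayNumGo : List (Int × Bool) → Int → Int
  | [], _ => 0
  | (i, flag) :: rest, idx =>
      if flag then (if idx = 0 then i else getDayNumGo rest (idx - 1))
      else getDayNumGo rest idx

def getDayNum (dayidx : Int) (M : Bool) (T : Bool) (W : Bool) (R : Bool) (F : Bool) (S : Bool) (U : Bool) : Int :=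
  getDayNumGo (PySem.List.enumerate [M, T, W, R, F, S, U] 0) dayidx

-- ===== PORT B =====
-- 'sum(1 for f in flags[:i] if f)'
def countTrue (l : List Bool) : Int :=
  l.foldl (fun acc f => if f then acc + 1 else acc) 0

def getDayNum_alt (dayidx : Int) (M : Bool) (T : Bool) (W : Bool) (R : Bool) (F : Bool) (S : Bool) (U : Bool) : Int :=
  let flags := [M, T, W, R, F, S, U]
  let k := dayidx
  -- 'sum(i for i in range(7) if flags[i] and sum(1 for f in flags[:i] if f) == k)'
  ((List.range 7).filter
      (fun i => flags.getD i false && decide (countTrue (flags.take i) = k))).foldl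
    (fun acc i => acc + (i : Int)) 0

-- ===== PRECONDITION & SPEC =====
def Spec_getDayNum (dayidx : Int) (M : Bool) (T : Bool) (W : Bool) (R : Bool) (F : Bool) (S : Bool) (U : Bool) (out : Int) : Prop := out = getDayNum_alt dayidx M T W R F S U
instance (dayidx : Int) (M : Bool) (T : Bool) (W : Bool) (R : Bool) (F : Bool) (S : Bool) (U : Bool) (out : Int) : Decidable (Spec_getDayNum dayidx M T W R F S U out) := by unfold Spec_getDayNum; infer_instance

-- ===== CLAIM (what is proved, stated in full; the proofs are below) =====
def Claim_equal_getDayNum : Prop := ∀ (dayidx : Int) (M : Bool) (T : Bool) (W : Bool) (R : Bool) (F : Bool) (S : Bool) (U : Bool), Dom_getDayNum dayidx M T W R F S U → Spec_getDayNum dayidx M T W R F S U (getDayNum dayidx M T W R F S U)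

-- ===== LEMMAS AND PROOFS =====

-- ===== VERDICT (by name: the statement is the Claim_ definition above) =====
set_option maxHeartbeats 2000000 in
theorem getDayNum_spec : Claim_equal_getDayNum := by
  intro dayidx M T W R F S U _
  have hcase : dayidx = 0 ∨ dayidx = 1 ∨ dayidx = 2 ∨ dayidx = 3 ∨ dayidx = 4 ∨
      dayidx = 5 ∨ dayidx = 6 ∨ (dayidx < 0 ∨ 7 ≤ dayidx) := by omega
  rcases hcase with rfl | rfl | rfl | rfl | rfl | rfl | rfl | h
  · revert M T W R F S U; decide
  · revert M T W R F S U; decide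
  · revert M T W R F S U; decide
  · revert M T W R F S U; decide
  · revert M T W R F S U; decide
  · revert M T W R F S U; decide
  · revert M T W R F S U; decide
  · -- dayidx out of range: every branch condition on both sides is false
    have h0 : ¬(dayidx = 0) := by omega
    have h1 : ¬(dayidx - 1 = 0) := by omega
    have h2 : ¬(dayidx - 1 - 1 = 0) := by omega
    have h3 : ¬(dayidx - 1 - 1 - 1 = 0) := by omega
    have h4 : ¬(dayidx - 1 - 1 - 1 - 1 = 0) := by omega
    have h5 : ¬(dayidx - 1 - 1 - 1 - 1 - 1 = 0) := by omega
    have h6 : ¬(dayidx - 1 - 1 - 1 - 1 - 1 - 1 = 0) := by omega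
    have g0 : ¬((0 : Int) = dayidx) := by omega
    have g1 : ¬((1 : Int) = dayidx) := by omega
    have g2 : ¬((2 : Int) = dayidx) := by omega
    have g3 : ¬((3 : Int) = dayidx) := by omega
    have g4 : ¬((4 : Int) = dayidx) := by omega
    have g5 : ¬((5 : Int) = dayidx) := by omega
    have g6 : ¬((6 : Int) = dayidx) := by omega
    unfold Spec_getDayNum getDayNum getDayNum_alt
    cases M <;> cases T <;> cases W <;> cases R <;> cases F <;> cases S <;> cases U <;>
      simp [getDayNumGo, countTrue, PySem.List.enumerate, List.range_succ,
        h0, h1, h2, h3, h4, h5, h6, g0, g1, g2, g3, g4, g5, g6]
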